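-- pv_equiv track=rewrite | github.com/Yurin/Google_STEP2024 | 1.1_find_anagram/anagram2.py | generate_possible_word
-- ===== SOURCE A (Python) =====
-- def generate_possible_word(random_word, r=None):  # generate_possible_word('a,b,c', r=2) -> ab,ac,ba,bc,ca,cb
--     pool = tuple(random_word)
--     n = len(pool)
--     r = n if r is None else r
--     if r > n:
--         return
--     indices = list(range(n))
--     cycles = list(range(n, n-r, -1))
--     yield ''.join(pool[i] for i in indices[:r])
--
--     while n:
--         for i in reversed(range(r)):
--             cycles[i] -= 1
--             if cycles[i] == 0:
--                 indices[i:] = indices[i+1:] + indices[i:i+1]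
--                 cycles[i] = n - i
--             else:
--                 j = cycles[i]
--                 indices[i], indices[-j] = indices[-j], indices[i]
--                 yield ''.join(pool[i] for i in indices[:r])
--                 break
--         else:
--             return
-- ===== SOURCE B (Python) =====
-- def generate_possible_word(random_word, r=None):
--     # B: recursive generator over index choices, lexicographic by index.
--     pool = tuple(random_word)
--     n = len(pool)
--     if r is None:
--         r = n
--     if r < 0 or r > n:
--         return
--     def rec(chosen, remaining):
--         if len(chosen) == r:
--             yield ''.join(chosen)
--             return
--         for k in range(len(remaining)):
--             yield from rec(chosen + [pool[remaining[k]]], remaining[:k] + remaining[k+1:])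
--     yield from rec([], list(range(n)))
-- ===== Notes on version B (the rewrite author's own statement) =====
-- stated objective: idiomatic
-- what changed: Replaces the imperative itertools-style indices/cycles counter machine with a recursive generator that picks each remaining index in increasing order, yielding the same lexicographic-by-index permutations.
-- intended difference: For r = some k with k < 0, A yields a single truncated prefix string (random_word[:k], an accident of negative slicing); B yields no permutation at all, which is the intended meaning of a negative permutation length. — e.g. on generate_possible_word("ab", some (-1)): A returns ["a"], B returns []
import Mathlib
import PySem

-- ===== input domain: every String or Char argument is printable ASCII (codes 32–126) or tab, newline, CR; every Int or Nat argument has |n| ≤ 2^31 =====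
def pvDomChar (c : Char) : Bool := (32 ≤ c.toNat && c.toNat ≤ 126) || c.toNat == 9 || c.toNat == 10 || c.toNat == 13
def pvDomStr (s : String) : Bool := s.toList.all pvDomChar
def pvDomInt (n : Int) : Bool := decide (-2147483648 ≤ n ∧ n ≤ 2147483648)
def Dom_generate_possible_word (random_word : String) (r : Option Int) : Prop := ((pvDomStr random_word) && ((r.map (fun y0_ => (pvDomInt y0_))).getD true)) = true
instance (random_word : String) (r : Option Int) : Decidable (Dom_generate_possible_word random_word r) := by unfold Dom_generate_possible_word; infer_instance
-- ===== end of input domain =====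

-- B replaces A's imperative indices/cycles counter machine by a recursive choice of still-unused
-- indices in increasing order (same output order); on negative r, B intentionally yields nothing
-- where A yields one truncated prefix (see D_ below).

-- shared helper: pool[i] for an index always in range (both Pythons read pool[idx] the same way)
def gpwChr (pool : List Char) (i : Int) : Char := (PySem.List.pyGet? pool i).getD ' '

-- ''.join(pool[i] for i in idxs)
def gpwJoin (pool : List Char) (idxs : List Int) : String := String.ofList (idxs.map (gpwChr pool))

-- ===== PORT A =====
-- the `for i in reversed(range(r))` body; returns none for the for-else `return`,
-- some (indices, cycles, yielded string) on `break`
def gpwA_inner (pool : List Char) (n rr : Int) : List Int → List Int → List Int → Option (List Int × List Int × String)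
  | [], _, _ => none
  | i :: rest, indices, cycles =>
    let ii := i.toNat                                    -- i ∈ range(r), so 0 ≤ i
    let cycles1 := cycles.set ii (cycles.getD ii 0 - 1)  -- cycles[i] -= 1
    if cycles1.getD ii 0 = 0 then
      -- indices[i:] = indices[i+1:] + indices[i:i+1]
      let indices1 := indices.take ii ++ indices.drop (ii+1) ++ (indices.drop ii).take 1
      let cycles2 := cycles1.set ii (n - i)              -- cycles[i] = n - i
      gpwA_inner pool n rr rest indices1 cycles2
    else
      let j := cycles1.getD ii 0
      let jj := (n - j).toNat                            -- indices[-j]; 1 ≤ j ≤ n here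
      let vi := indices.getD ii 0
      let vj := indices.getD jj 0
      let indices1 := (indices.set ii vj).set jj vi      -- indices[i], indices[-j] = indices[-j], indices[i]
      some (indices1, cycles1, gpwJoin pool (PySem.List.slice indices1 none (some rr)))

-- the `while n:` loop; fuel n!+1 is proved sufficient below (the loop yields at most n!/(n-r)! times)
def gpwA_while (pool : List Char) (n rr : Int) : Nat → List Int → List Int → List String → List String
  | 0, _, _, acc => acc.reverse
  | fuel+1, indices, cycles, acc =>
    if n = 0 then acc.reverse
    else match gpwA_inner pool n rr ((PySem.List.pyRange 0 rr 1).reverse) indices cycles with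
      | none => acc.reverse
      | some (ind, cyc, s) => gpwA_while pool n rr fuel ind cyc (s :: acc)

def generate_possible_word (random_word : String) (r : Option Int) : List String :=
  let pool := random_word.toList
  let n : Int := pool.length
  let rr := match r with | none => n | some v => v
  if rr > n then []
  else
    let indices := PySem.List.pyRange 0 n 1
    let cycles := PySem.List.pyRange n (n - rr) (-1)
    let first := gpwJoin pool (PySem.List.slice indices none (some rr))  -- yield pool over indices[:r]
    gpwA_while pool n rr (pool.length.factorial + 1) indices cycles [first]

-- ===== PORT B =====
-- rec(chosen, remaining): yield the join when len(chosen) == r, else pick each remaining index in order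
def gpwB_rec (pool : List Char) (rr : Int) (chosen : List Char) (remaining : List Int) : List String :=
  if (chosen.length : Int) = rr then [String.ofList chosen]
  else (List.finRange remaining.length).flatMap
    (fun k => gpwB_rec pool rr (chosen ++ [gpwChr pool (remaining.getD k.val 0)]) (remaining.eraseIdx k.val))
termination_by remaining.length
decreasing_by simpa [List.length_eraseIdx, k.isLt] using Nat.sub_lt (Nat.pos_of_ne_zero (by have := k.isLt; omega)) Nat.one_pos

def generate_possible_word_alt (random_word : String) (r : Option Int) : List String :=
  let pool := random_word.toList
  let n : Int := pool.length
  let rr := match r with | none => n | some v => v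
  if rr < 0 ∨ rr > n then []
  else gpwB_rec pool rr [] (PySem.List.pyRange 0 n 1)

-- ===== PRECONDITION & SPEC =====
-- For r = some k with k < 0, A yields a single truncated prefix string random_word[:k] (an accident
-- of Python's negative slicing in `indices[:r]`); B yields no permutation at all, which is the
-- intended meaning of a negative permutation length.
def D_generate_possible_word (random_word : String) (r : Option Int) : Prop :=
  ∃ k : Int, r = some k ∧ k < 0
instance (random_word : String) (r : Option Int) : Decidable (D_generate_possible_word random_word r) := by
  unfold D_generate_possible_word
  exact match r with
  | none => isFalse (by simp)
  | some k => decidable_of_iff (k < 0) (by simp)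

def Spec_generate_possible_word (random_word : String) (r : Option Int) (out : List String) : Prop := ¬ D_generate_possible_word random_word r → out = generate_possible_word_alt random_word r
instance (random_word : String) (r : Option Int) (out : List String) : Decidable (Spec_generate_possible_word random_word r out) := by unfold Spec_generate_possible_word; infer_instance

def pvDiffWitness_generate_possible_word : String × Option Int := ("ab", some (-1))
def pvDiffWitnessOut_generate_possible_word : (List String) × (List String) := (["a"], [])

-- ===== CLAIM (what is proved, stated in full; the proofs are below) =====
def Claim_unchanged_generate_possible_word : Prop := ∀ (random_word : String) (r : Option Int), Dom_generate_possible_word random_word r → Spec_generate_possible_word random_word r (generate_possible_word random_word r)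
def Claim_changed_generate_possible_word : Prop := Dom_generate_possible_word (pvDiffWitness_generate_possible_word.1) (pvDiffWitness_generate_possible_word.2) ∧ D_generate_possible_word (pvDiffWitness_generate_possible_word.1) (pvDiffWitness_generate_possible_word.2) ∧ generate_possible_word (pvDiffWitness_generate_possible_word.1) (pvDiffWitness_generate_possible_word.2) = pvDiffWitnessOut_generate_possible_word.1 ∧ generate_possible_word_alt (pvDiffWitness_generate_possible_word.1) (pvDiffWitness_generate_possible_word.2) = pvDiffWitnessOut_generate_possible_word.2 ∧ pvDiffWitnessOut_generate_possible_word.1 ≠ pvDiffWitnessOut_generate_possible_word.2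
def Claim_exact_generate_possible_word : Prop := ∀ (random_word : String) (r : Option Int), Dom_generate_possible_word random_word r → D_generate_possible_word random_word r → generate_possible_word random_word r ≠ generate_possible_word_alt random_word r

-- ===== LEMMAS AND PROOFS =====

-- The machine state of A is indexed by a mixed-radix counter c (level i counts 0 ≤ c_i < n - i):
-- pvSel c s   = the r selected elements (lexicographic selection by position),
-- pvInd c s   = the whole `indices` list of A at counter c,
-- pvCyc c n   = the `cycles` list of A at counter c,
-- pvC n r     = all counters in A's emission order, pvAfter c n = the counters strictly after c,
-- pvIncr c n  = the successor counter (none when c is the last one).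
def pvSel : List Nat → List Int → List Int
  | [], _ => []
  | c :: cs, s => s.getD c 0 :: pvSel cs (s.eraseIdx c)

def pvInd : List Nat → List Int → List Int
  | [], s => s
  | c :: cs, s => s.getD c 0 :: pvInd cs (s.eraseIdx c)

def pvCyc : List Nat → Nat → List Int
  | [], _ => []
  | c :: cs, n => ((n : Int) - (c : Int)) :: pvCyc cs (n - 1)

def pvValid : List Nat → Nat → Prop
  | [], _ => True
  | c :: cs, n => c < n ∧ pvValid cs (n - 1)

def pvC : Nat → Nat → List (List Nat)
  | _, 0 => [[]]
  | n, r+1 => (List.range n).flatMap (fun x => (pvC (n-1) r).map (x :: ·))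

def pvAfter : List Nat → Nat → List (List Nat)
  | [], _ => []
  | c :: cs, n => (pvAfter cs (n-1)).map (c :: ·)
      ++ (List.range' (c+1) (n-1-c)).flatMap (fun x => (pvC (n-1) cs.length).map (x :: ·))

def pvIncr : List Nat → Nat → Option (List Nat)
  | [], _ => none
  | c :: cs, n =>
    match pvIncr cs (n-1) with
    | some cs' => some (c :: cs')
    | none => if c + 1 < n then some ((c+1) :: List.replicate cs.length 0) else none

-- ---- basic structure lemmas ----
lemma pvInd_zeros (c : List Nat) (s : List Int) (hz : ∀ x ∈ c, x = 0) (h : pvValid c s.length) :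
    pvInd c s = s := by
  induction c generalizing s with
  | nil => rfl
  | cons c cs ih =>
    obtain ⟨h1, h2⟩ := h
    have hc : c = 0 := hz c (by simp)
    subst hc
    cases s with
    | nil => simp at h1
    | cons v t =>
      simp only [pvInd, List.eraseIdx_cons_zero, List.getD_cons_zero]
      rw [ih t (fun x hx => hz x (by simp [hx])) (by simpa using h2)]

lemma pvInd_take (c : List Nat) (s : List Int) (h : pvValid c s.length) :
    (pvInd c s).take c.length = pvSel c s := by
  induction c generalizing s with
  | nil => rfl
  | cons c cs ih =>
    obtain ⟨h1, h2⟩ := h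
    have hl : (s.eraseIdx c).length = s.length - 1 := by
      simp [List.length_eraseIdx, h1]
    simp only [pvInd, pvSel, List.length_cons, List.take_succ_cons]
    rw [ih (s.eraseIdx c) (by rw [hl]; exact h2)]

lemma pvValid_replicate (k n : Nat) (h : k ≤ n) : pvValid (List.replicate k 0) n := by
  induction k generalizing n with
  | zero => trivial
  | succ k ih => exact ⟨by omega, ih (n-1) (by omega)⟩

lemma pvSel_replicate (k : Nat) (s : List Int) (h : k ≤ s.length) :
    pvSel (List.replicate k 0) s = s.take k := by
  induction k generalizing s with
  | zero => simp [pvSel]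
  | succ k ih =>
    cases s with
    | nil => simp at h
    | cons v t =>
      simp only [List.replicate_succ, pvSel, List.eraseIdx_cons_zero, List.getD_cons_zero,
        List.take_succ_cons]
      rw [ih t (by simpa using h)]

lemma pvIncr_length (c c' : List Nat) (n : Nat) (h : pvIncr c n = some c') : c'.length = c.length := by
  induction c generalizing c' n with
  | nil => simp [pvIncr] at h
  | cons c cs ih =>
    simp only [pvIncr] at h
    cases hcs : pvIncr cs (n-1) with
    | some cs' =>
      rw [hcs] at h
      cases h
      simp [ih cs' (n-1) hcs]
    | none =>
      rw [hcs] at h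
      by_cases hc : c + 1 < n
      · simp only [if_pos hc] at h
        cases h
        simp
      · simp [if_neg hc] at h

lemma pvIncr_valid (c c' : List Nat) (n : Nat) (hv : pvValid c n) (hl : c.length ≤ n)
    (h : pvIncr c n = some c') : pvValid c' n := by
  induction c generalizing c' n with
  | nil => simp [pvIncr] at h
  | cons c cs ih =>
    obtain ⟨h1, h2⟩ := hv
    simp only [pvIncr] at h
    cases hcs : pvIncr cs (n-1) with
    | some cs' =>
      rw [hcs] at h
      cases h
      exact ⟨h1, ih cs' (n-1) h2 (by simp at hl; omega) hcs⟩
    | none =>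
      rw [hcs] at h
      by_cases hc : c + 1 < n
      · simp only [if_pos hc] at h
        cases h
        exact ⟨hc, pvValid_replicate _ _ (by simp at hl; omega)⟩
      · simp [if_neg hc] at h

lemma pvC_length_le (n r : Nat) (h : r ≤ n) : (pvC n r).length ≤ n.factorial := by
  induction r generalizing n with
  | zero => simpa using Nat.one_le_iff_ne_zero.mpr (Nat.factorial_ne_zero n)
  | succ r ih =>
    have hn : n ≠ 0 := by omega
    calc (pvC n (r+1)).length = n * (pvC (n-1) r).length := by
          simp [pvC, List.length_flatMap, List.map_const',
            List.sum_replicate, smul_eq_mul]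
      _ ≤ n * (n-1).factorial := Nat.mul_le_mul_left n (ih (n-1) (by omega))
      _ = n.factorial := by
          conv_rhs => rw [show n = (n-1) + 1 by omega]
          rw [Nat.factorial_succ]
          congr 1
          omega

-- pure list surgery facts used by the flat-state lemmas
lemma pvEraseSet (s : List Int) (x : Nat) (h : x + 1 < s.length) :
    (s.eraseIdx x).set x (s.getD x 0) = s.eraseIdx (x+1) := by
  apply List.ext_getElem
  · simp only [List.length_set, List.length_eraseIdx]; split_ifs <;> omega
  · intro j h1 h2
    have hx : x < s.length := by omega
    have hget : s.getD x 0 = s[x] := List.getD_eq_getElem s 0 hx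
    simp only [List.getElem_set, List.getElem_eraseIdx, hget]
    split_ifs <;> (try rfl) <;> (try omega) <;> (try (congr 1; omega)) <;> (try (subst_vars; rfl))

lemma pvEraseSnoc (s : List Int) (h : s ≠ []) :
    s.eraseIdx (s.length - 1) ++ [s.getD (s.length - 1) 0] = s := by
  have h1 : s.length - 1 < s.length := by cases s <;> simp_all
  apply List.ext_getElem
  · simp only [List.length_append, List.length_eraseIdx, List.length_cons, List.length_nil]
    split_ifs <;> omega
  · intro j hj1 hj2
    rw [List.getElem_append]
    split_ifs with hs
    · simp only [List.length_eraseIdx, if_pos h1] at hs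
      rw [List.getElem_eraseIdx, dif_pos (by omega : j < s.length - 1)]
    · simp only [List.length_eraseIdx, if_pos h1] at hs ⊢
      have : j = s.length - 1 := by omega
      subst this
      simp [List.getElem?_eq_getElem h1]

lemma pvEraseGetD (s : List Int) (x : Nat) (h : x + 1 < s.length) :
    (s.eraseIdx x).getD x 0 = s.getD (x+1) 0 := by
  have h1 : x < (s.eraseIdx x).length := by simp only [List.length_eraseIdx]; split_ifs <;> omega
  rw [List.getD_eq_getElem _ 0 h1, List.getD_eq_getElem s 0 h, List.getElem_eraseIdx]
  simp

-- ---- flat-state lemmas (position p = a.length) ----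
lemma pvCyc_getD (a : List Nat) (x : Nat) (zs : List Nat) (n : Nat) (hn : a.length < n) :
    (pvCyc (a ++ x :: zs) n).getD a.length 0 = (n : Int) - a.length - x := by
  induction a generalizing n with
  | nil => simp [pvCyc]
  | cons c a ih =>
    simp only [List.cons_append, pvCyc, List.length_cons, List.getD_cons_succ]
    rw [ih (n-1) (by simp at hn; omega)]
    omega

lemma pvCyc_set (a : List Nat) (x y : Nat) (zs : List Nat) (n : Nat) (hn : a.length < n) :
    (pvCyc (a ++ x :: zs) n).set a.length ((n : Int) - a.length - y) = pvCyc (a ++ y :: zs) n := by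
  induction a generalizing n with
  | nil => simp [pvCyc]
  | cons c a ih =>
    simp only [List.cons_append, pvCyc, List.length_cons, List.set_cons_succ]
    congr 1
    rw [← ih (n-1) (by simp at hn; omega)]
    congr 1
    omega

lemma pvInd_rotate (a : List Nat) (x : Nat) (zs : List Nat) (s : List Int)
    (hz : ∀ u ∈ zs, u = 0) (hv : pvValid (a ++ x :: zs) s.length)
    (hx : x + 1 = s.length - a.length) :
    (pvInd (a ++ x :: zs) s).take a.length ++ (pvInd (a ++ x :: zs) s).drop (a.length + 1)
      ++ ((pvInd (a ++ x :: zs) s).drop a.length).take 1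
    = pvInd (a ++ 0 :: zs) s := by
  induction a generalizing s with
  | nil =>
    simp only [List.nil_append, List.length_nil, Nat.zero_add] at *
    obtain ⟨h1, h2⟩ := hv
    have hzz : pvInd zs (s.eraseIdx x) = s.eraseIdx x := by
      apply pvInd_zeros zs _ hz
      have : (s.eraseIdx x).length = s.length - 1 := by
        simp only [List.length_eraseIdx]; split_ifs <;> omega
      rw [this]; exact h2
    have hne : s ≠ [] := by intro e; subst e; simp at h1
    have hx1 : x = s.length - 1 := by omega
    simp only [pvInd, hzz]
    rw [List.take_zero, List.drop_zero, List.drop_one, List.nil_append, List.tail_cons,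
      List.take_cons (by simp), List.take_zero]
    subst hx1
    rw [pvEraseSnoc s hne]
    have hzz0 : pvInd zs (s.eraseIdx 0) = s.eraseIdx 0 := by
      apply pvInd_zeros zs _ hz
      have : (s.eraseIdx 0).length = s.length - 1 := by
        simp only [List.length_eraseIdx]; split_ifs <;> omega
      rw [this]; exact h2
    simp only [pvInd, hzz0]
    cases s with
    | nil => simp at h1
    | cons v t => simp
  | cons c a ih =>
    obtain ⟨h1, h2⟩ := hv
    simp only [List.cons_append, pvInd, List.length_cons, List.take_succ_cons,
      List.drop_succ_cons, List.cons_append]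
    have hlen : (s.eraseIdx c).length = s.length - 1 := by
      simp only [List.length_eraseIdx]; split_ifs <;> omega
    congr 1
    exact ih (s.eraseIdx c) (by rw [hlen]; exact h2) (by simp only [List.length_cons] at hx; omega)

lemma pvInd_swap (a : List Nat) (x : Nat) (zs : List Nat) (s : List Int)
    (hz : ∀ u ∈ zs, u = 0) (hv : pvValid (a ++ x :: zs) s.length)
    (hx : x + 1 < s.length - a.length) :
    (((pvInd (a ++ x :: zs) s).set a.length ((pvInd (a ++ x :: zs) s).getD (a.length + x + 1) 0)).set
        (a.length + x + 1) ((pvInd (a ++ x :: zs) s).getD a.length 0))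
    = pvInd (a ++ (x+1) :: zs) s := by
  induction a generalizing s with
  | nil =>
    simp only [List.nil_append, List.length_nil, Nat.zero_add] at *
    obtain ⟨h1, h2⟩ := hv
    have hzz : pvInd zs (s.eraseIdx x) = s.eraseIdx x := by
      apply pvInd_zeros zs _ hz
      have : (s.eraseIdx x).length = s.length - 1 := by
        simp only [List.length_eraseIdx]; split_ifs <;> omega
      rw [this]; exact h2
    have hzz1 : pvInd zs (s.eraseIdx (x+1)) = s.eraseIdx (x+1) := by
      apply pvInd_zeros zs _ hz
      have : (s.eraseIdx (x+1)).length = s.length - 1 := by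
        simp only [List.length_eraseIdx]; split_ifs <;> omega
      rw [this]; exact h2
    simp only [pvInd, hzz, hzz1, List.getD_cons_succ, List.getD_cons_zero,
      List.set_cons_zero, List.set_cons_succ]
    rw [pvEraseGetD s x (by omega), pvEraseSet s x (by omega)]
  | cons c a ih =>
    obtain ⟨h1, h2⟩ := hv
    simp only [List.cons_append, pvInd, List.length_cons]
    rw [show a.length + 1 + x + 1 = (a.length + x + 1) + 1 from by omega]
    simp only [List.getD_cons_succ, List.set_cons_succ]
    congr 1
    have hlen : (s.eraseIdx c).length = s.length - 1 := by
      simp only [List.length_eraseIdx]; split_ifs <;> omega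
    exact ih (s.eraseIdx c) (by rw [hlen]; exact h2)
      (by rw [hlen]; simp only [List.length_cons] at hx; omega)

-- ---- successor lemmas ----
lemma pvIncr_snoc_max (a : List Nat) (x n : Nat) (hx : x + 1 = n - a.length) (hl : a.length < n) :
    pvIncr (a ++ [x]) n = Option.map (· ++ [0]) (pvIncr a n) := by
  induction a generalizing n with
  | nil =>
    simp only [List.nil_append, List.length_nil, Nat.sub_zero] at hx
    simp [pvIncr, hx]
  | cons c a ih =>
    simp only [List.length_cons] at hx hl
    have hih := ih (n-1) (by omega) (by omega)
    simp only [List.cons_append, pvIncr, hih]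
    cases ha : pvIncr a (n-1) with
    | some a'' => simp
    | none =>
      simp only [Option.map_none]
      by_cases hc : c + 1 < n
      · simp [if_pos hc, List.replicate_succ' ]
      · simp [if_neg hc]

lemma pvIncr_snoc_lt (a : List Nat) (x n : Nat) (hx : x + 1 < n - a.length) :
    pvIncr (a ++ [x]) n = some (a ++ [x+1]) := by
  induction a generalizing n with
  | nil =>
    simp only [List.nil_append, List.length_nil, Nat.sub_zero] at hx
    simp [pvIncr, hx]
  | cons c a ih =>
    simp only [List.length_cons] at hx
    have hih := ih (n-1) (by omega)
    simp [pvIncr, hih]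

lemma pvC_first (n r : Nat) (h : r ≤ n) :
    pvC n r = List.replicate r 0 :: pvAfter (List.replicate r 0) n := by
  induction r generalizing n with
  | zero => simp [pvC, pvAfter]
  | succ r ih =>
    have hn : 1 ≤ n := by omega
    have hrange : List.range n = 0 :: List.range' 1 (n-1) := by
      rw [List.range_eq_range', show n = (n-1) + 1 from by omega, List.range'_succ]
      norm_num
    rw [pvC, hrange, List.flatMap_cons]
    simp only [ih (n-1) (by omega), List.replicate_succ, pvAfter, List.length_replicate,
      List.map_cons, List.cons_append, Nat.sub_zero, Nat.zero_add]

lemma pvAfter_incr (c : List Nat) (n : Nat) (hv : pvValid c n) (hl : c.length ≤ n) :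
    pvAfter c n = (match pvIncr c n with
      | none => []
      | some c' => c' :: pvAfter c' n) := by
  induction c generalizing n with
  | nil => simp [pvAfter, pvIncr]
  | cons c cs ih =>
    obtain ⟨h1, h2⟩ := hv
    simp only [List.length_cons] at hl
    have hih := ih (n-1) h2 (by omega)
    simp only [pvAfter, pvIncr]
    cases hcs : pvIncr cs (n-1) with
    | some cs' =>
      rw [hcs] at hih
      rw [hih]
      simp only [List.map_cons, List.cons_append]
      congr 1
      simp [pvAfter, pvIncr_length cs cs' (n-1) hcs]
    | none =>
      rw [hcs] at hih
      rw [hih]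
      simp only [List.map_nil, List.nil_append]
      by_cases hc : c + 1 < n
      · simp only [if_pos hc]
        have hr : List.range' (c+1) (n-1-c) = (c+1) :: List.range' (c+2) (n-1-(c+1)) := by
          rw [show n-1-c = (n-1-(c+1)) + 1 from by omega, List.range'_succ]
        rw [hr, List.flatMap_cons]
        simp only [pvC_first (n-1) cs.length (by omega), List.map_cons, List.cons_append,
          pvAfter, List.length_replicate]
      · simp [if_neg hc, show n-1-c = 0 from by omega]

-- ---- the inner for-loop lemma ----
def pvRevR (k : Nat) : List Int := ((List.range k).map (fun i => (i : Int))).reverse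

lemma pvMapSingleton (m : Nat) :
    List.map (fun k : Nat => (k : Int)) (List.range m)
    = List.flatMap (fun a : Nat => [(a : Int)]) (List.range m) := by
  induction m with
  | zero => rfl
  | succ m ih => simp [List.range_succ, ih]

lemma pvRevR_succ (k : Nat) : pvRevR (k+1) = (k : Int) :: pvRevR k := by
  simp [pvRevR, List.range_succ]

lemma pvValid_mid (a : List Nat) (x : Nat) (zs : List Nat) (n : Nat)
    (h : pvValid (a ++ x :: zs) n) : x < n - a.length := by
  induction a generalizing n with
  | nil => simpa using h.1
  | cons c t ih =>
    have := ih (n-1) h.2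
    simp only [List.length_cons]
    have hc : c < n := h.1
    omega

lemma pvValid_replace_mid (a : List Nat) (x y : Nat) (zs : List Nat) (n : Nat)
    (h : pvValid (a ++ x :: zs) n) (hy : y < n - a.length) : pvValid (a ++ y :: zs) n := by
  induction a generalizing n with
  | nil => exact ⟨by simpa using hy, h.2⟩
  | cons c t ih =>
    refine ⟨h.1, ih (n-1) h.2 ?_⟩
    simp only [List.length_cons] at hy
    omega

lemma gpwA_inner_eq (pool : List Char) (s : List Int) (rr : Int) (a zs : List Nat)
    (hv : pvValid (a ++ zs) s.length) (hz : ∀ u ∈ zs, u = 0)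
    (hr : rr = ((a ++ zs).length : Int)) (hlen : (a ++ zs).length ≤ s.length) :
    gpwA_inner pool s.length rr (pvRevR a.length) (pvInd (a ++ zs) s) (pvCyc (a ++ zs) s.length)
    = (match pvIncr a s.length with
       | none => none
       | some a' => some (pvInd (a' ++ zs) s, pvCyc (a' ++ zs) s.length,
                          gpwJoin pool (pvSel (a' ++ zs) s))) := by
  induction a using List.reverseRecOn generalizing zs with
  | nil => simp [pvRevR, gpwA_inner, pvIncr]
  | append_singleton a x ih =>
    have hassoc : (a ++ [x]) ++ zs = a ++ x :: zs := by simp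
    rw [hassoc] at hv hlen
    rw [hassoc, show (a ++ [x]).length = a.length + 1 from by simp, pvRevR_succ]
    have hp : a.length < s.length := by
      simp only [List.length_append, List.length_cons] at hlen; omega
    have hxlt : x < s.length - a.length := pvValid_mid a x zs s.length hv
    have hc1 : (pvCyc (a ++ x :: zs) s.length).getD a.length 0 - 1
        = (s.length : Int) - a.length - ((x:Int)+1) := by
      rw [pvCyc_getD a x zs s.length hp]; ring
    have hset1 : (pvCyc (a ++ x :: zs) s.length).set a.length
          ((pvCyc (a ++ x :: zs) s.length).getD a.length 0 - 1)
        = pvCyc (a ++ (x+1) :: zs) s.length := by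
      rw [hc1, show ((s.length : Int) - a.length - ((x:Int)+1)) = ((s.length : Int) - a.length - ((x+1 : Nat) : Int)) from by push_cast; ring]
      exact pvCyc_set a x (x+1) zs s.length hp
    have hget1 : (pvCyc (a ++ (x+1) :: zs) s.length).getD a.length 0
        = (s.length : Int) - a.length - ((x:Int)+1) := by
      rw [pvCyc_getD a (x+1) zs s.length hp]; push_cast; ring
    simp only [gpwA_inner, Int.toNat_natCast, hset1, hget1]
    by_cases hcase : x + 1 = s.length - a.length
    · -- cycles[i] hit 0: rotate indices[i:], reset cycles[i], continue with i-1
      rw [if_pos (by omega)]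
      have hrot := pvInd_rotate a x zs s hz hv (by omega)
      rw [hrot]
      have hcyc2 : (pvCyc (a ++ (x+1) :: zs) s.length).set a.length ((s.length : Int) - (a.length : Int))
          = pvCyc (a ++ 0 :: zs) s.length := by
        rw [show ((s.length : Int) - (a.length : Int)) = ((s.length : Int) - a.length - ((0 : Nat) : Int)) from by push_cast; ring]
        exact pvCyc_set a (x+1) 0 zs s.length hp
      rw [hcyc2]
      have hih := ih (0 :: zs)
        (pvValid_replace_mid a x 0 zs s.length hv (by omega))
        (by intro u hu; rcases List.mem_cons.mp hu with h | h; exacts [h, hz u h])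
        (by rw [hr]; simp)
        (by simpa using hlen)
      rw [hih, pvIncr_snoc_max a x s.length (by omega) hp]
      cases pvIncr a s.length with
      | none => rfl
      | some a' => simp
    · -- cycles[i] ≠ 0: swap indices[i] with indices[-j] and yield
      rw [if_neg (by omega)]
      have hjj : ((s.length : Int) - ((s.length : Int) - (a.length : Int) - ((x:Int)+1))).toNat
          = a.length + x + 1 := by omega
      rw [hjj]
      have hswap := pvInd_swap a x zs s hz hv (by omega)
      rw [hswap, pvIncr_snoc_lt a x s.length (by omega)]
      have hval' : pvValid (a ++ (x+1) :: zs) s.length :=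
        pvValid_replace_mid a x (x+1) zs s.length hv (by omega)
      have hlen' : rr = (((a ++ (x+1) :: zs).length : Nat) : Int) := by
        rw [hr]; simp
      rw [hlen', PySem.List.slice_to_natCast, pvInd_take _ _ hval']
      simp

-- ---- the outer while-loop lemma ----
lemma gpwA_while_eq (pool : List Char) (s : List Int) (rNat : Nat) (fuel : Nat)
    (c : List Nat) (acc : List String)
    (hv : pvValid c s.length) (hc : c.length = rNat) (hr : rNat ≤ s.length) (hn : s.length ≠ 0)
    (hfuel : (pvAfter c s.length).length < fuel) :
    gpwA_while pool s.length rNat fuel (pvInd c s) (pvCyc c s.length) acc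
    = acc.reverse ++ (pvAfter c s.length).map (fun c' => gpwJoin pool (pvSel c' s)) := by
  induction fuel generalizing c acc with
  | zero => omega
  | succ fuel ihf =>
    have hpy : (PySem.List.pyRange 0 ((rNat : Nat) : Int) 1).reverse = pvRevR rNat := by
      rw [PySem.List.pyRange_one, pvRevR]
      congr 1
      simpa using pvMapSingleton rNat
    have hinner := gpwA_inner_eq pool s rNat c []
      (by simpa using hv) (by simp) (by simp [hc]) (by simpa [hc] using hr)
    simp only [List.append_nil] at hinner
    rw [hc] at hinner
    cases hinc : pvIncr c s.length with
    | none =>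
      rw [hinc] at hinner
      rw [gpwA_while, if_neg (by exact_mod_cast hn), hpy, hinner,
        pvAfter_incr c s.length hv (by omega), hinc]
      simp
    | some c' =>
      rw [hinc] at hinner
      rw [gpwA_while, if_neg (by exact_mod_cast hn), hpy, hinner,
        pvAfter_incr c s.length hv (by omega), hinc]
      have hlen' : c'.length = rNat := by rw [pvIncr_length c c' s.length hinc, hc]
      have hval' : pvValid c' s.length := pvIncr_valid c c' s.length hv (by omega) hinc
      rw [pvAfter_incr c s.length hv (by omega), hinc] at hfuel
      simp only [List.length_cons] at hfuel
      show gpwA_while pool (↑s.length) (↑rNat) fuel (pvInd c' s) (pvCyc c' s.length)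
        (gpwJoin pool (pvSel c' s) :: acc)
        = acc.reverse ++ List.map (fun c'' => gpwJoin pool (pvSel c'' s)) (c' :: pvAfter c' s.length)
      rw [ihf c' (gpwJoin pool (pvSel c' s) :: acc) hval' hlen' (by omega)]
      simp

-- ---- initial-state and bridging lemmas ----
lemma pvPyRangeNeg (a b : Int) :
    PySem.List.pyRange a b (-1) = (List.range (a-b).toNat).map (fun i : Nat => a - (i:Int)) := by
  simp only [PySem.List.pyRange]
  norm_num
  by_cases h : b < a
  · rw [if_pos h]
    simp [sub_eq_add_neg]
  · rw [if_neg h]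
    have : (a-b).toNat = 0 := by omega
    simp [this]

lemma pvCyc_replicate (k n : Nat) (h : k ≤ n) :
    pvCyc (List.replicate k 0) n = (List.range k).map (fun i : Nat => (n : Int) - (i : Int)) := by
  induction k generalizing n with
  | zero => rfl
  | succ k ih =>
    rw [List.replicate_succ, List.range_succ_eq_map]
    simp only [pvCyc, List.map_cons, List.map_map, Nat.cast_zero, sub_zero]
    congr 1
    rw [ih (n-1) (by omega)]
    apply List.map_congr_left
    intro i _
    simp only [Function.comp_apply]
    omega

lemma pvFinFlatMap {α : Type} (n : Nat) (g : Nat → List α) :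
    (List.finRange n).flatMap (fun k => g k.val) = (List.range n).flatMap g := by
  induction n with
  | zero => rfl
  | succ m ih =>
    rw [List.finRange_succ_last, List.range_succ]
    simp only [List.flatMap_append, List.flatMap_map, List.flatMap_singleton]
    rw [← ih]
    simp

-- ---- B characterisation ----
lemma gpwB_rec_eq (pool : List Char) (rr : Int) (k : Nat) :
    ∀ (remaining : List Int) (chosen : List Char), (chosen.length : Int) + (k : Int) = rr →
    gpwB_rec pool rr chosen remaining
    = (pvC remaining.length k).map
        (fun c => String.ofList (chosen ++ (pvSel c remaining).map (gpwChr pool))) := by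
  induction k with
  | zero =>
    intro remaining chosen hlen
    rw [gpwB_rec, if_pos (by push_cast at hlen; omega)]
    simp [pvC, pvSel]
  | succ k ih =>
    intro remaining chosen hlen
    rw [gpwB_rec, if_neg (by push_cast at hlen ⊢; omega)]
    rw [pvFinFlatMap remaining.length
      (fun kk => gpwB_rec pool rr (chosen ++ [gpwChr pool (remaining.getD kk 0)]) (remaining.eraseIdx kk))]
    rw [show pvC remaining.length (k+1)
        = (List.range remaining.length).flatMap (fun x => (pvC (remaining.length - 1) k).map (x :: ·)) from rfl]
    rw [List.map_flatMap]
    apply List.flatMap_congr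
    intro x hx
    have hxlt : x < remaining.length := List.mem_range.mp hx
    have hel : (remaining.eraseIdx x).length = remaining.length - 1 := by
      simp only [List.length_eraseIdx]; split_ifs <;> omega
    rw [ih (remaining.eraseIdx x) (chosen ++ [gpwChr pool (remaining.getD x 0)])
      (by simp only [List.length_append, List.length_cons, List.length_nil]
          push_cast at hlen ⊢; omega), hel, List.map_map]
    apply List.map_congr_left
    intro c _
    simp [pvSel, Function.comp_def]

-- ---- core agreement on the non-degenerate path (0 ≤ r ≤ n) ----
lemma gpw_core (pool : List Char) (rNat : Nat) (h : rNat ≤ pool.length) :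
    gpwA_while pool (pool.length : Int) (rNat : Int) (pool.length.factorial + 1)
      (PySem.List.pyRange 0 (pool.length : Int) 1)
      (PySem.List.pyRange (pool.length : Int) ((pool.length : Int) - (rNat : Int)) (-1))
      [gpwJoin pool (PySem.List.slice (PySem.List.pyRange 0 (pool.length : Int) 1) none (some (rNat : Int)))]
    = gpwB_rec pool (rNat : Int) [] (PySem.List.pyRange 0 (pool.length : Int) 1) := by
  have hlen : (PySem.List.pyRange 0 (pool.length : Int) 1).length = pool.length := by
    rw [PySem.List.length_pyRange_one]; omega
  set s := PySem.List.pyRange 0 (pool.length : Int) 1 with hsdef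
  set z := List.replicate rNat 0 with hzdef
  have hzv : pvValid z s.length := pvValid_replicate _ _ (by omega)
  have hind : s = pvInd z s := (pvInd_zeros z s (by simp [hzdef]) hzv).symm
  have hcyc : PySem.List.pyRange (pool.length : Int) ((pool.length : Int) - (rNat : Int)) (-1)
      = pvCyc z s.length := by
    rw [pvPyRangeNeg, pvCyc_replicate rNat s.length (by omega), hlen,
      show ((pool.length : Int) - ((pool.length : Int) - (rNat : Int))).toNat = rNat from by omega,
      ]
  have hfirst : gpwJoin pool (PySem.List.slice s none (some (rNat : Int)))
      = gpwJoin pool (pvSel z s) := by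
    rw [PySem.List.slice_to_natCast, ← pvSel_replicate rNat s (by omega)]
  have hB : gpwB_rec pool (rNat : Int) [] s
      = (pvC s.length rNat).map (fun c => gpwJoin pool (pvSel c s)) := by
    rw [gpwB_rec_eq pool (rNat : Int) rNat s [] (by simp)]
    simp [gpwJoin]
  by_cases hn0 : pool.length = 0
  · rw [gpwA_while, if_pos (by exact_mod_cast hn0), hfirst, hB, hlen]
    have hr0 : rNat = 0 := by omega
    subst hr0
    simp [pvSel, pvC, hzdef]
  · rw [hfirst, hcyc, hlen]
    have hfuel : (pvAfter z s.length).length < pool.length.factorial + 1 := by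
      have h1 : (pvC s.length rNat).length ≤ pool.length.factorial := by
        rw [hlen]; exact pvC_length_le pool.length rNat h
      have h2 : pvC s.length rNat = z :: pvAfter z s.length := by
        rw [hlen] at *; exact pvC_first pool.length rNat h
      rw [h2] at h1
      simp only [List.length_cons] at h1
      omega
    have hw := gpwA_while_eq pool s rNat (pool.length.factorial + 1) z
      [gpwJoin pool (pvSel z s)] hzv (by simp [hzdef]) (by omega) (by omega) hfuel
    rw [hlen] at hw
    rw [← hind] at hw
    rw [hw, hB, hlen, pvC_first pool.length rNat h]
    simp [hzdef]

-- ===== VERDICT (by name: the statement is the Claim_ definition above) =====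
theorem generate_possible_word_spec : Claim_unchanged_generate_possible_word := by
  intro w r _ hnd
  show generate_possible_word w r = generate_possible_word_alt w r
  unfold generate_possible_word generate_possible_word_alt
  cases r with
  | none =>
    simp only
    rw [if_neg (by omega), if_neg (by push_cast; omega)]
    exact_mod_cast gpw_core w.toList w.toList.length le_rfl
  | some k =>
    have hk : 0 ≤ k := by
      by_contra hneg
      exact hnd ⟨k, rfl, by omega⟩
    simp only
    by_cases hgt : k > (w.toList.length : Int)
    · rw [if_pos hgt, if_pos (Or.inr hgt)]
    · rw [if_neg hgt, if_neg (by push_cast; omega)]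
      rw [show k = ((k.toNat : Nat) : Int) from (Int.toNat_of_nonneg hk).symm]
      exact gpw_core w.toList k.toNat (by omega)

theorem generate_possible_word_changed : Claim_changed_generate_possible_word := by
  unfold Claim_changed_generate_possible_word; decide

theorem generate_possible_word_tight : Claim_exact_generate_possible_word := by
  intro w r _ hD
  obtain ⟨k, rfl, hk⟩ := hD
  show generate_possible_word w (some k) ≠ generate_possible_word_alt w (some k)
  unfold generate_possible_word generate_possible_word_alt
  simp only
  rw [if_neg (by omega : ¬ k > (w.toList.length : Int)), if_pos (Or.inl hk)]
  rw [gpwA_while]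
  by_cases hn : ((w.toList.length : Nat) : Int) = 0
  · rw [if_pos hn]; simp
  · rw [if_neg hn]
    rw [show PySem.List.pyRange 0 k 1 = [] from by
      rw [PySem.List.pyRange_one, show (k - 0).toNat = 0 from by omega]; rfl]
    simp [gpwA_inner]
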